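-- pv_equiv track=rewrite | github.com/Daoud-youssef/mathsbooklet | docs/algebra/unit6-quadratics/Quadratics.py | simplify_surd
-- ===== SOURCE A (Python) =====
-- def simplify_surd(n):
--     """Return (k, m) such that √n = k√m (m square-free). n must be ≥ 0."""
--     if n < 0: return (0, -1)   # signal: non-real
--     if n == 0: return (0, 0)
--     k = 1
--     m = n
--     i = 2
--     while i * i <= m:
--         while m % (i * i) == 0:
--             m //= i * i
--             k *= i
--         i += 1
--     return (k, m)
-- ===== SOURCE B (Python) =====
-- def simplify_surd(n):
--     """Return (k, m) such that sqrt(n) = k*sqrt(m) (m square-free)."""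
--     if n < 0: return (0, -1)
--     if n == 0: return (0, 0)
--     # integer square root by ascending search
--     r = 1
--     while (r + 1) * (r + 1) <= n:
--         r += 1
--     # largest d <= isqrt(n) whose square divides n
--     d = r
--     while n % (d * d) != 0:
--         d -= 1
--     return (d, n // (d * d))
-- ===== Notes on version B (the rewrite author's own statement) =====
-- stated objective: alternative
-- what changed: B searches directly for the largest d with d*d dividing n, scanning down from isqrt(n) (itself computed by an ascending loop), instead of extracting square factors by trial division with an accumulator.
import Mathlib
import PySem

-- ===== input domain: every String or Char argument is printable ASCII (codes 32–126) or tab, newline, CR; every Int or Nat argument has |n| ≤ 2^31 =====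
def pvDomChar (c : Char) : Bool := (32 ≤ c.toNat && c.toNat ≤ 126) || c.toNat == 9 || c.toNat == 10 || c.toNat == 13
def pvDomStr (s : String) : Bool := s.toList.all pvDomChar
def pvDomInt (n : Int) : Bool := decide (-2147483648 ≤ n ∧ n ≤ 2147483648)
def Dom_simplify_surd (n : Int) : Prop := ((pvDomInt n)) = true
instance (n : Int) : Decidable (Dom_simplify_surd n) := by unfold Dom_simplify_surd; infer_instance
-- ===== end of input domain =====

-- B replaces A's trial-division square-factor extraction by a direct downward scan for the
-- largest d with d*d ∣ n (objective: alternative, not faster).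

-- ===== PORT A =====
-- inner loop `while m % (i*i) == 0: m //= i*i; k *= i`; the guards `m ≠ 0` and `2 ≤ i`
-- only make the recursion total (they hold on every state simplify_surd reaches).
def aInner (k m i : Nat) : Nat × Nat :=
  if h : 2 ≤ i ∧ m ≠ 0 ∧ m % (i * i) = 0 then
    aInner (k * i) (m / (i * i)) i
  else (k, m)
termination_by m
decreasing_by
  exact Nat.div_lt_self (Nat.pos_of_ne_zero h.2.1)
    (lt_of_lt_of_le (by norm_num) (Nat.mul_le_mul h.1 h.1))

-- the port's outer-loop termination needs this bound, so it stays above the claim block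
theorem aInner_snd_le (k m i : Nat) : (aInner k m i).2 ≤ m := by
  fun_induction aInner with
  | case1 k m h ih => exact le_trans ih (Nat.div_le_self _ _)
  | case2 k m h => exact le_refl m

-- outer loop `while i*i <= m: …; i += 1`; guard `2 ≤ i` is totality-only (i starts at 2).
def aOuter (k m i : Nat) : Nat × Nat :=
  if h : 2 ≤ i ∧ i * i ≤ m then
    aOuter (aInner k m i).1 (aInner k m i).2 (i + 1)
  else (k, m)
termination_by m - i
decreasing_by
  have h1 : i < i * i := by nlinarith [h.1, h.2]
  have h2 : (aInner k m i).2 ≤ m := aInner_snd_le k m i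
  have h3 := h.2
  omega

def simplify_surd (n : Int) : Int × Int :=
  if n < 0 then (0, -1)
  else if n = 0 then (0, 0)
  else
    (((aOuter 1 n.toNat 2).1 : Int), ((aOuter 1 n.toNat 2).2 : Int))

-- ===== PORT B =====
-- integer square root by ascending search: `r = 1; while (r+1)*(r+1) <= n: r += 1`
def bSqrt (r n : Nat) : Nat :=
  if (r + 1) * (r + 1) ≤ n then bSqrt (r + 1) n else r
termination_by n - r
decreasing_by
  have : r + 1 ≤ n := le_trans (Nat.le_mul_of_pos_right _ (Nat.succ_pos r)) ‹_›
  omega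

-- `while n % (d*d) != 0: d -= 1`; guard `d ≠ 0` is totality-only (d = 1 always stops the loop).
def bDown (d n : Nat) : Nat :=
  if d ≠ 0 ∧ ¬ n % (d * d) = 0 then bDown (d - 1) n else d
termination_by d
decreasing_by omega

def simplify_surd_alt (n : Int) : Int × Int :=
  if n < 0 then (0, -1)
  else if n = 0 then (0, 0)
  else
    ((bDown (bSqrt 1 n.toNat) n.toNat : Int),
     ((n.toNat / (bDown (bSqrt 1 n.toNat) n.toNat * bDown (bSqrt 1 n.toNat) n.toNat) : Nat) : Int))

-- ===== PRECONDITION & SPEC =====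
def Spec_simplify_surd (n : Int) (out : Int × Int) : Prop := out = simplify_surd_alt n
instance (n : Int) (out : Int × Int) : Decidable (Spec_simplify_surd n out) := by unfold Spec_simplify_surd; infer_instance

-- ===== CLAIM (what is proved, stated in full; the proofs are below) =====
def Claim_equal_simplify_surd : Prop := ∀ (n : Int), Dom_simplify_surd n → Spec_simplify_surd n (simplify_surd n)

-- ===== LEMMAS AND PROOFS =====

theorem aInner_spec (k m i : Nat) :
    (aInner k m i).1 * (aInner k m i).1 * (aInner k m i).2 = k * k * m ∧
    (aInner k m i).2 ∣ m ∧ (m ≠ 0 → (aInner k m i).2 ≠ 0) ∧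
    (2 ≤ i → m ≠ 0 → ¬ (i * i ∣ (aInner k m i).2)) := by
  fun_induction aInner with
  | case1 k m h ih =>
    obtain ⟨hi, hm, hmod⟩ := h
    have hdvd : i * i ∣ m := Nat.dvd_of_mod_eq_zero hmod
    have hii : 0 < i * i := by positivity
    have hq : m / (i * i) ≠ 0 := by
      have := Nat.div_pos (Nat.le_of_dvd (Nat.pos_of_ne_zero hm) hdvd) hii
      omega
    obtain ⟨ih1, ih2, ih3, ih4⟩ := ih
    refine ⟨?_, ih2.trans (Nat.div_dvd_of_dvd hdvd), fun _ => ih3 hq, fun _ _ => ih4 hi hq⟩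
    rw [ih1]
    have : i * i * (m / (i * i)) = m := Nat.mul_div_cancel' hdvd
    calc k * i * (k * i) * (m / (i * i)) = k * k * (i * i * (m / (i * i))) := by ring
      _ = k * k * m := by rw [this]
  | case2 k m h =>
    refine ⟨rfl, dvd_refl m, fun hm => hm, fun hi hm hd => ?_⟩
    have hmod : ¬ m % (i * i) = 0 := fun hc => h ⟨hi, hm, hc⟩
    exact hmod (Nat.mod_eq_zero_of_dvd hd)

theorem aOuter_spec (k m i : Nat) :
    2 ≤ i → m ≠ 0 → (∀ j, 2 ≤ j → j < i → ¬ j * j ∣ m) →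
    (aOuter k m i).1 * (aOuter k m i).1 * (aOuter k m i).2 = k * k * m ∧
    (aOuter k m i).2 ≠ 0 ∧ Squarefree (aOuter k m i).2 := by
  fun_induction aOuter with
  | case1 k m i h ih =>
    intro hi hm hsq
    obtain ⟨ha1, ha2, ha3, ha4⟩ := aInner_spec k m i
    have hm' : (aInner k m i).2 ≠ 0 := ha3 hm
    have hsq' : ∀ j, 2 ≤ j → j < i + 1 → ¬ j * j ∣ (aInner k m i).2 := by
      intro j hj1 hj2 hd
      rcases Nat.lt_succ_iff_lt_or_eq.1 hj2 with hlt | rfl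
      · exact hsq j hj1 hlt (hd.trans ha2)
      · exact ha4 hi hm hd
    obtain ⟨ih1, ih2, ih3⟩ := ih (by omega) hm' hsq'
    exact ⟨by rw [ih1, ha1], ih2, ih3⟩
  | case2 k m i h =>
    intro hi hm hsq
    have hlt : m < i * i := by
      by_contra hc
      exact h ⟨hi, by omega⟩
    refine ⟨rfl, hm, fun x hx => ?_⟩
    rw [Nat.isUnit_iff]
    by_contra hx1
    have hx0 : x ≠ 0 := by
      rintro rfl
      exact hm (Nat.eq_zero_of_zero_dvd (by simpa using hx))
    have hx2 : 2 ≤ x := by omega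
    have hxm : x * x ≤ m := Nat.le_of_dvd (Nat.pos_of_ne_zero hm) hx
    have hxi : x < i := by nlinarith
    exact hsq x hx2 hxi hx

theorem bSqrt_spec (r n : Nat) : r * r ≤ n → bSqrt r n = Nat.sqrt n := by
  fun_induction bSqrt with
  | case1 r h ih => exact fun _ => ih h
  | case2 r h =>
    intro hr
    have h1 : r ≤ Nat.sqrt n := Nat.le_sqrt.2 hr
    have h2 : Nat.sqrt n < r + 1 := Nat.sqrt_lt.2 (by omega)
    omega

theorem bDown_spec (d n : Nat) :
    1 ≤ d →
    1 ≤ bDown d n ∧ bDown d n ≤ d ∧ n % (bDown d n * bDown d n) = 0 ∧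
    ∀ e, bDown d n < e → e ≤ d → ¬ e * e ∣ n := by
  fun_induction bDown with
  | case1 d h ih =>
    intro _
    have hd2 : 2 ≤ d := by
      by_contra hc
      have hd1 : d = 1 := by
        have := h.1
        omega
      subst hd1
      exact h.2 (by simp [Nat.mod_one])
    obtain ⟨ih1, ih2, ih3, ih4⟩ := ih (by omega)
    refine ⟨ih1, by omega, ih3, fun e he1 he2 hd => ?_⟩
    rcases Nat.lt_or_ge (d - 1) e with hgt | hle
    · have : e = d := by omega
      subst this
      exact h.2 (Nat.mod_eq_zero_of_dvd hd)
    · exact ih4 e he1 hle hd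
  | case2 d h =>
    intro hd
    have hmod : n % (d * d) = 0 := by
      by_contra hx
      exact h ⟨by omega, hx⟩
    exact ⟨hd, le_refl d, hmod, fun e he1 he2 _ => by omega⟩

theorem dvd_of_sq_dvd (d K M : Nat) (hd : d ≠ 0) (hK : K ≠ 0) (hM : Squarefree M)
    (h : d * d ∣ K * K * M) : d ∣ K := by
  have hM0 : M ≠ 0 := hM.ne_zero
  rw [← Nat.factorization_le_iff_dvd hd hK]
  rw [Finsupp.le_def]
  intro p
  have h2 : (d * d).factorization ≤ (K * K * M).factorization :=
    (Nat.factorization_le_iff_dvd (mul_ne_zero hd hd) (by positivity)).2 h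
  have h3 := Finsupp.le_def.1 h2 p
  rw [Nat.factorization_mul hd hd, Nat.factorization_mul (mul_ne_zero hK hK) hM0,
    Nat.factorization_mul hK hK] at h3
  simp only [Finsupp.add_apply] at h3
  have hm1 : M.factorization p ≤ 1 := hM.natFactorization_le_one p
  omega

-- ===== VERDICT (by name: the statement is the Claim_ definition above) =====
theorem simplify_surd_spec : Claim_equal_simplify_surd := by
  unfold Claim_equal_simplify_surd
  intro n _
  unfold Spec_simplify_surd simplify_surd simplify_surd_alt
  split_ifs with h1 h2
  · rfl
  · rfl
  · have hn : 0 < n := lt_of_le_of_ne (not_lt.1 h1) (Ne.symm h2)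
    have hN0 : n.toNat ≠ 0 := by omega
    obtain ⟨hprod, hMne, hsf⟩ :=
      aOuter_spec 1 n.toNat 2 (le_refl 2) hN0 (fun j hj1 hj2 _ => by omega)
    rw [one_mul, one_mul] at hprod
    have hK0 : (aOuter 1 n.toNat 2).1 ≠ 0 := by
      intro hc; rw [hc] at hprod; simp at hprod; omega
    have hs : bSqrt 1 n.toNat = Nat.sqrt n.toNat := bSqrt_spec 1 n.toNat (by omega)
    have hsp : 1 ≤ Nat.sqrt n.toNat := Nat.sqrt_pos.2 (by omega)
    obtain ⟨hg1, hgle, hgmod, hgmax⟩ := bDown_spec (Nat.sqrt n.toNat) n.toNat hsp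
    have hgd : bDown (Nat.sqrt n.toNat) n.toNat * bDown (Nat.sqrt n.toNat) n.toNat ∣ n.toNat :=
      Nat.dvd_of_mod_eq_zero hgmod
    have hKle : (aOuter 1 n.toNat 2).1 ≤ Nat.sqrt n.toNat := by
      apply Nat.le_sqrt.2
      calc (aOuter 1 n.toNat 2).1 * (aOuter 1 n.toNat 2).1
          ≤ (aOuter 1 n.toNat 2).1 * (aOuter 1 n.toNat 2).1 * (aOuter 1 n.toNat 2).2 :=
            Nat.le_mul_of_pos_right _ (Nat.pos_of_ne_zero hMne)
        _ = n.toNat := hprod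
    have hKd : (aOuter 1 n.toNat 2).1 * (aOuter 1 n.toNat 2).1 ∣ n.toNat :=
      ⟨(aOuter 1 n.toNat 2).2, hprod.symm⟩
    have h5 : (aOuter 1 n.toNat 2).1 ≤ bDown (Nat.sqrt n.toNat) n.toNat := by
      by_contra hc
      exact hgmax _ (by omega) hKle hKd
    have h6 : bDown (Nat.sqrt n.toNat) n.toNat ∣ (aOuter 1 n.toNat 2).1 :=
      dvd_of_sq_dvd _ _ _ (by omega) hK0 hsf (by rw [hprod]; exact hgd)
    have h7 : bDown (Nat.sqrt n.toNat) n.toNat = (aOuter 1 n.toNat 2).1 :=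
      le_antisymm (Nat.le_of_dvd (Nat.pos_of_ne_zero hK0) h6) h5
    have h8 : n.toNat / ((aOuter 1 n.toNat 2).1 * (aOuter 1 n.toNat 2).1)
        = (aOuter 1 n.toNat 2).2 := by
      calc n.toNat / ((aOuter 1 n.toNat 2).1 * (aOuter 1 n.toNat 2).1)
          = (aOuter 1 n.toNat 2).1 * (aOuter 1 n.toNat 2).1 * (aOuter 1 n.toNat 2).2 /
            ((aOuter 1 n.toNat 2).1 * (aOuter 1 n.toNat 2).1) := by rw [hprod]
        _ = (aOuter 1 n.toNat 2).2 :=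
            Nat.mul_div_cancel_left _ (Nat.pos_of_ne_zero (mul_ne_zero hK0 hK0))
    rw [hs, h7, h8]
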